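-- pv_equiv track=rewrite | github.com/lukasdean/robust_python | std_module/code_fragment.py | replace_with_element
-- ===== SOURCE A (Python) =====
-- import copy
--
-- def replace_with_element(pending_iterable, pattern_tuple):
--     """
--     对于可迭代对象根据提供的模式进行元素值替换
--     @日期: 过去的某个时刻
--     @作者: 徐嘉辉
--     Args:
--         pending_iterable: 可迭代对象
--         pattern_tuple: 模式元组(待替换元素,用于替换元素,待替换元素,用于替换元素...)
--
--     Returns:
--         返回替换完毕的原可迭代对象的列表副本
--     """
--
--     # 判断pattern_tuple长度是否为偶数
--     if len(pattern_tuple) & 1: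
--         # 长度为奇数，抛出ValueError
--         raise ValueError("输入的模式元组长度为奇数，请检查其正确性！")
--
--     pending_copy = list(copy.deepcopy(pending_iterable))
--
--     for i, element in enumerate(pending_iterable):
--
--         for j, pattern in enumerate(pattern_tuple):
--
--             if (j & 1) and (element == pattern_tuple[j - 1]):
--                 # 奇数下标时判断当前元素是否和模式元组中上一个元素值相等，相等则进行替换并跳出当前循环
--                 pending_copy[i] = pattern_tuple[j]
--
--                 break
--
--     return pending_copy
-- ===== SOURCE B (Python) =====
-- import copy
--
-- def replace_with_element(pending_iterable, pattern_tuple):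
--     if len(pattern_tuple) & 1:
--         raise ValueError("输入的模式元组长度为奇数，请检查其正确性！")
--     out = list(copy.deepcopy(pending_iterable))
--     replaced = [False] * len(out)
--     for k in range(0, len(pattern_tuple), 2):
--         old, new = pattern_tuple[k], pattern_tuple[k + 1]
--         for i in range(len(out)):
--             if not replaced[i] and out[i] == old:
--                 out[i] = new
--                 replaced[i] = True
--     return out
-- ===== Notes on version B (the rewrite author's own statement) =====
-- stated objective: alternative
-- what changed: B inverts the traversal: instead of scanning the pattern tuple per element with a break (inner loop over pairs), it loops over pattern pairs in order and sweeps the list once per pair, marking positions in a replaced mask so later pairs never touch an already-replaced position.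
import Mathlib
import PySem

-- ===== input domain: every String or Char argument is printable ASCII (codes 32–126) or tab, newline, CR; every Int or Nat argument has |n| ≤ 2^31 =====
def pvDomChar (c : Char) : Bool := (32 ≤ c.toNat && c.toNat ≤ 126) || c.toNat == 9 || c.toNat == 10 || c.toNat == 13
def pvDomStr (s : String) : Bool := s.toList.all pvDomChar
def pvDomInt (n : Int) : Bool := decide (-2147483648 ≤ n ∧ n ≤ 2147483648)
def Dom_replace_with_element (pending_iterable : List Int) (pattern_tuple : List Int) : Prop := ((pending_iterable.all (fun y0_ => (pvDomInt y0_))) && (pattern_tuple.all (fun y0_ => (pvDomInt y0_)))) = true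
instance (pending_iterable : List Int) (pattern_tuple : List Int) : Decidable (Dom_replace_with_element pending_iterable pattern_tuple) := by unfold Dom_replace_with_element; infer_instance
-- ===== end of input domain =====

-- B inverts A's nested traversal: outer loop over pattern pairs, inner sweep over the
-- list with a replaced mask (alternative decomposition, same cost).

-- ===== PORT A =====
-- inner loop 'for j, pattern in enumerate(pattern_tuple): if (j & 1) and (element == pattern_tuple[j-1]): … break'
-- pattern_tuple[j-1] is ported with pyGetD: when the branch is reachable j is odd, so 0 ≤ j-1 < len (exact, no IndexError).
def aInner (element : Int) (pt : List Int) : List (Int × Int) → Option Int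
  | [] => none
  | (j, pattern) :: rest =>
    if PySem.Int.band j 1 ≠ 0 ∧ element = PySem.List.pyGetD pt (j - 1) 0 then some pattern
    else aInner element pt rest

def replace_with_element (pending_iterable : List Int) (pattern_tuple : List Int) : List Int :=
  pending_iterable.map (fun element =>
    match aInner element pattern_tuple (PySem.List.enumerate pattern_tuple 0) with
    | some v => v
    | none => element)

-- ===== PORT B =====
-- state: one cell (value, replaced-flag) per position; 'for i in range(len(out)): …'
-- is one map over the cells, 'for k in range(0, len, 2)' is the pair recursion bGo.
def bPairStep (old nw : Int) (st : List (Int × Bool)) : List (Int × Bool) :=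
  st.map (fun c => if !c.2 && c.1 == old then (nw, true) else c)

def bGo : List Int → List (Int × Bool) → List (Int × Bool)
  | old :: nw :: rest, st => bGo rest (bPairStep old nw st)
  | _, st => st

def replace_with_element_alt (pending_iterable : List Int) (pattern_tuple : List Int) : List Int :=
  (bGo pattern_tuple (pending_iterable.map (fun v => (v, false)))).map (fun c => c.1)

-- ===== PRECONDITION & SPEC =====
-- Pre_: both Pythons raise ValueError when the pattern tuple has odd length.
def Pre_replace_with_element (pending_iterable : List Int) (pattern_tuple : List Int) : Prop :=
  pattern_tuple.length % 2 = 0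
instance (pending_iterable : List Int) (pattern_tuple : List Int) : Decidable (Pre_replace_with_element pending_iterable pattern_tuple) := by unfold Pre_replace_with_element; infer_instance
def pvWitness_replace_with_element : List Int × List Int := ([1, 2, 3], [1, 9, 3, 7])

def Spec_replace_with_element (pending_iterable : List Int) (pattern_tuple : List Int) (out : List Int) : Prop := out = replace_with_element_alt pending_iterable pattern_tuple
instance (pending_iterable : List Int) (pattern_tuple : List Int) (out : List Int) : Decidable (Spec_replace_with_element pending_iterable pattern_tuple out) := by unfold Spec_replace_with_element; infer_instance

-- ===== CLAIM (what is proved, stated in full; the proofs are below) =====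
def Claim_equal_replace_with_element : Prop := ∀ (pending_iterable : List Int) (pattern_tuple : List Int), Dom_replace_with_element pending_iterable pattern_tuple → Pre_replace_with_element pending_iterable pattern_tuple → Spec_replace_with_element pending_iterable pattern_tuple (replace_with_element pending_iterable pattern_tuple)

-- ===== LEMMAS AND PROOFS =====

-- first-match lookup over consecutive pairs: the common semantics of both loops
def pairLookup (e : Int) : List Int → Option Int
  | old :: new :: rest => if e = old then some new else pairLookup e rest
  | _ => none

theorem aInner_enum (e : Int) (pt : List Int) (tail : List Int) (s : Int)
    (hs : 0 ≤ s) (hev : s % 2 = 0) (hdrop : List.drop s.toNat pt = tail) :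
    aInner e pt (PySem.List.enumerate tail s) = pairLookup e tail := by
  match tail with
  | [] => simp [PySem.List.enumerate_nil, aInner, pairLookup]
  | [a] =>
    have h1 : PySem.Int.band s 1 = 0 := by
      rw [PySem.Int.band_one, PySem.Int.mod_eq_emod_of_pos (by norm_num)]; omega
    simp [PySem.List.enumerate_cons, PySem.List.enumerate_nil, aInner, pairLookup, h1]
  | a :: b :: rest =>
    have h1 : PySem.Int.band s 1 = 0 := by
      rw [PySem.Int.band_one, PySem.Int.mod_eq_emod_of_pos (by norm_num)]; omega
    have h2 : PySem.Int.band (s + 1) 1 = 1 := by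
      rw [PySem.Int.band_one, PySem.Int.mod_eq_emod_of_pos (by norm_num)]; omega
    have hlen : s.toNat < pt.length := by
      by_contra h
      simp [List.drop_eq_nil_of_le (Nat.le_of_not_lt h)] at hdrop
    have ha : PySem.List.pyGetD pt s 0 = a := by
      rw [PySem.List.pyGetD_eq_getElem pt 0 hs (by omega)]
      have h0 : 0 < (List.drop s.toNat pt).length := by rw [hdrop]; simp
      have hg := List.getElem_drop (xs := pt) (i := s.toNat) (j := 0) (h := h0)
      simp [hdrop] at hg
      exact hg.symm
    have hdrop2 : List.drop (s + 2).toNat pt = rest := by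
      have hc := congrArg (List.drop 2) hdrop
      have ht : (s + 2).toNat = s.toNat + 2 := by omega
      rw [ht]
      simpa [List.drop_drop, Nat.add_comm] using hc
    rw [PySem.List.enumerate_cons, PySem.List.enumerate_cons]
    by_cases he : e = a
    · simp [aInner, pairLookup, h1, h2, ha, he]
    · have hrec := aInner_enum e pt rest (s + 2) (by omega) (by omega) hdrop2
      simp [aInner, pairLookup, h1, h2, ha, he, hrec, show s + 1 + 1 = s + 2 from by ring]
termination_by tail.length

-- one cell processed through all pairs
def bCell : List Int → (Int × Bool) → Int × Bool
  | old :: nw :: rest, c => bCell rest (if !c.2 && c.1 == old then (nw, true) else c)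
  | _, c => c

theorem bGo_eq_map (pt : List Int) (st : List (Int × Bool)) :
    bGo pt st = st.map (bCell pt) := by
  match pt with
  | [] => simp [bGo, bCell]
  | [a] => simp [bGo, bCell]
  | a :: b :: rest =>
    rw [show bGo (a :: b :: rest) st = bGo rest (bPairStep a b st) from rfl,
      bGo_eq_map rest, bPairStep, List.map_map]
    rfl
termination_by pt.length

theorem bCell_true (pt : List Int) (v : Int) : bCell pt (v, true) = (v, true) := by
  match pt with
  | [] => rfl
  | [a] => rfl
  | a :: b :: rest => simpa [bCell] using bCell_true rest v
termination_by pt.length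

theorem bCell_false (pt : List Int) (e : Int) :
    bCell pt (e, false) = match pairLookup e pt with
      | some v => (v, true)
      | none => (e, false) := by
  match pt with
  | [] => rfl
  | [a] => rfl
  | a :: b :: rest =>
    by_cases he : e = a
    · simp [bCell, pairLookup, he, bCell_true]
    · simpa [bCell, pairLookup, he] using bCell_false rest e
termination_by pt.length

-- ===== VERDICT (by name: the statement is the Claim_ definition above) =====
theorem replace_with_element_spec : Claim_equal_replace_with_element := by
  intro pending pt _ _
  unfold Spec_replace_with_element replace_with_element replace_with_element_alt
  rw [bGo_eq_map, List.map_map, List.map_map]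
  refine List.map_congr_left (fun e _ => ?_)
  have ha := aInner_enum e pt pt 0 (le_refl 0) (by norm_num) (by simp)
  simp only [ha, Function.comp, bCell_false]
  cases pairLookup e pt <;> rfl
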